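-- pv_equiv track=rewrite | github.com/pkbro/SI206-Fall2017 | final_project/final.py | day_iterate
-- ===== SOURCE A (Python) =====
-- def day_iterate(day):
--     early = 0
--     mid_early = 0
--     late = 0
--     very_late = 0
--     for x in day:
--         if x[0] == '6':
--             early += 1
--         elif x[0] == '12':
--             mid_early += 1
--         elif x[0] == '18':
--             late += 1
--         else:
--             very_late += 1
--
--     return([early,mid_early,late,very_late])
-- ===== SOURCE B (Python) =====
-- def day_iterate(day):
--     heads = [x[0] for x in day]
--     early = heads.count('6')
--     mid_early = heads.count('12')
--     late = heads.count('18')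
--     return [early, mid_early, late, len(heads) - early - mid_early - late]
-- ===== Notes on version B (the rewrite author's own statement) =====
-- stated objective: idiomatic
-- what changed: Replaces the four scalar accumulators updated through an if/elif chain by a single pass extracting the first elements and counting the three named buckets with list.count, the catch-all bucket being the total minus the three counts.
import Mathlib
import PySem

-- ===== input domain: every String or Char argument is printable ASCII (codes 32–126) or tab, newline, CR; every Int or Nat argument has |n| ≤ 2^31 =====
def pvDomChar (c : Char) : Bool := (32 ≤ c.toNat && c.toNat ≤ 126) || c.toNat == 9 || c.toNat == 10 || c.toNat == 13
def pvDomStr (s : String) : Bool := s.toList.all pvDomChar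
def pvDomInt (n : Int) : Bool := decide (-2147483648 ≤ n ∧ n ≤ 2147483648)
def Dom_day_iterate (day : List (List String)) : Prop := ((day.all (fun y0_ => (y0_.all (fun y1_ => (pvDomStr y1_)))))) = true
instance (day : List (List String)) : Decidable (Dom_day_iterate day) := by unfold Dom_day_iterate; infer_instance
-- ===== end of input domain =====

-- B replaces A's if/elif chain over four scalar accumulators by extracting the first
-- elements once and counting each named bucket, the catch-all being total minus the rest (idiomatic).


-- ===== PORT A =====
-- x[0] is PySem.List.pyGet?; Pre_ guarantees it is `some`, the .getD "" default is never used inside Pre_.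
def day_iterate (day : List (List String)) : List Int :=
  let r := day.foldl (fun (s : Int × Int × Int × Int) x =>
    let h := (PySem.List.pyGet? x 0).getD ""
    if h == "6" then (s.1 + 1, s.2.1, s.2.2.1, s.2.2.2)
    else if h == "12" then (s.1, s.2.1 + 1, s.2.2.1, s.2.2.2)
    else if h == "18" then (s.1, s.2.1, s.2.2.1 + 1, s.2.2.2)
    else (s.1, s.2.1, s.2.2.1, s.2.2.2 + 1)) (0, 0, 0, 0)
  [r.1, r.2.1, r.2.2.1, r.2.2.2]

-- ===== PORT B =====
def day_iterate_alt (day : List (List String)) : List Int :=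
  let heads := day.map (fun x => (PySem.List.pyGet? x 0).getD "")
  let early : Int := PySem.List.count heads "6"
  let mid_early : Int := PySem.List.count heads "12"
  let late : Int := PySem.List.count heads "18"
  [early, mid_early, late, (heads.length : Int) - early - mid_early - late]

-- ===== PRECONDITION & SPEC =====
-- Pre_ excludes exactly the inputs with an empty inner list, on which Python A (x[0]) raises IndexError.
def Pre_day_iterate (day : List (List String)) : Prop := ∀ x ∈ day, x ≠ []
instance (day : List (List String)) : Decidable (Pre_day_iterate day) := by unfold Pre_day_iterate; infer_instance
def pvWitness_day_iterate : List (List String) := [["6"], ["12", "a"], ["7"], ["18"]]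
def Spec_day_iterate (day : List (List String)) (out : List Int) : Prop := out = day_iterate_alt day
instance (day : List (List String)) (out : List Int) : Decidable (Spec_day_iterate day out) := by unfold Spec_day_iterate; infer_instance

-- ===== CLAIM (what is proved, stated in full; the proofs are below) =====
def Claim_equal_day_iterate : Prop := ∀ (day : List (List String)), Dom_day_iterate day → Pre_day_iterate day → Spec_day_iterate day (day_iterate day)

-- ===== LEMMAS AND PROOFS =====
-- The loop of A, started from an arbitrary accumulator, adds the three counts of the
-- head list and the remainder; proved by induction generalizing the accumulator.
theorem day_iterate_foldl (day : List (List String)) (e m l v : Int) :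
    day.foldl (fun (s : Int × Int × Int × Int) x =>
      let h := (PySem.List.pyGet? x 0).getD ""
      if h == "6" then (s.1 + 1, s.2.1, s.2.2.1, s.2.2.2)
      else if h == "12" then (s.1, s.2.1 + 1, s.2.2.1, s.2.2.2)
      else if h == "18" then (s.1, s.2.1, s.2.2.1 + 1, s.2.2.2)
      else (s.1, s.2.1, s.2.2.1, s.2.2.2 + 1)) (e, m, l, v) =
    (let heads := day.map (fun x => (PySem.List.pyGet? x 0).getD "")
     (e + PySem.List.count heads "6", m + PySem.List.count heads "12",
      l + PySem.List.count heads "18",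
      v + ((heads.length : Int) - PySem.List.count heads "6" - PySem.List.count heads "12"
            - PySem.List.count heads "18"))) := by
  induction day generalizing e m l v with
  | nil => simp [PySem.List.count]
  | cons x xs ih =>
    simp only [List.foldl_cons, List.map_cons]
    rw [ih]
    simp only [PySem.List.count, List.count_cons]
    split_ifs with h1 h2 h3 <;>
      simp_all [PySem.List.count] <;> push_cast <;> try ring
    all_goals (constructor <;> trivial)

-- ===== VERDICT (by name: the statement is the Claim_ definition above) =====
theorem day_iterate_spec : Claim_equal_day_iterate := by
  intro day _ _
  show _ = _
  simp only [day_iterate, day_iterate_alt, day_iterate_foldl]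
  simp
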